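-- pv_equiv track=rewrite | github.com/HalfSilent/coc7e-TV1 | CoCGame/editor/editor_mapa.py | _gerar_vazio
-- ===== SOURCE A (Python) =====
-- from typing import Dict, List, Optional, Tuple
--
-- def _gerar_vazio(cols: int, linhas: int) -> List[List[int]]:
--     """Cria grid preenchido com CHÃO e bordas de PAREDE."""
--     return [
--         [
--             2 if (r == 0 or r == linhas - 1 or c == 0 or c == cols - 1)
--             else 1
--             for c in range(cols)
--         ]
--         for r in range(linhas)
--     ]
-- ===== SOURCE B (Python) =====
-- def _gerar_vazio(cols, linhas):
--     """Cria grid preenchido com CHAO e bordas de PAREDE."""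
--     grid = [[1] * cols for _ in range(linhas)]
--     if linhas > 0:
--         grid[0] = [2] * cols
--         grid[-1] = [2] * cols
--     if cols > 0:
--         for row in grid:
--             row[0] = 2
--             row[-1] = 2
--     return grid
-- ===== Notes on version B (the rewrite author's own statement) =====
-- stated objective: simpler
-- what changed: Replaces the per-cell four-way boundary conditional comprehension by a two-phase construction: allocate an all-floor grid with list repetition, then overwrite the first/last rows and each row's first/last cell with walls.
import Mathlib
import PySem

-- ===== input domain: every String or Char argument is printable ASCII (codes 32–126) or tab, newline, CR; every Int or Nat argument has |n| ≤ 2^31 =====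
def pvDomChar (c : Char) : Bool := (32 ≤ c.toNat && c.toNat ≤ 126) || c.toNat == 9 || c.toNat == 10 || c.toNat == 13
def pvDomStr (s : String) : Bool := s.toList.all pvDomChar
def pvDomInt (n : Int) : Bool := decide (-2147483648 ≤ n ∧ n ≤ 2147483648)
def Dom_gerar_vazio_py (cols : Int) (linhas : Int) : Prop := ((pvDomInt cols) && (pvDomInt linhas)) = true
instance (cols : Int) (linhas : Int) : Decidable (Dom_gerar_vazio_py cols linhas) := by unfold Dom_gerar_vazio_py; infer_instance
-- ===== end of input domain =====

-- B replaces A's per-cell four-way boundary conditional by a two-phase build (allocate all-floor grid, then overwrite border rows/cells); same return value, objective: simpler.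

-- ===== PORT A =====
def gerar_vazio_py (cols : Int) (linhas : Int) : List (List Int) :=
  (PySem.List.pyRange 0 linhas 1).map (fun r =>
    (PySem.List.pyRange 0 cols 1).map (fun c =>
      if r = 0 ∨ r = linhas - 1 ∨ c = 0 ∨ c = cols - 1 then (2 : Int) else 1))

-- ===== PORT B =====
-- grid = [[1]*cols for _ in range(linhas)]
def pvGridFloor (cols : Int) (linhas : Int) : List (List Int) :=
  (PySem.List.pyRange 0 linhas 1).map (fun _ => List.replicate cols.toNat (1 : Int))

-- if linhas > 0: grid[0] = [2]*cols; grid[-1] = [2]*cols   (grid[-1] = index len-1)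
def pvGridRows (cols : Int) (linhas : Int) : List (List Int) :=
  if linhas > 0 then
    ((pvGridFloor cols linhas).set 0 (List.replicate cols.toNat 2)).set
      ((pvGridFloor cols linhas).length - 1) (List.replicate cols.toNat 2)
  else pvGridFloor cols linhas

-- if cols > 0: for row in grid: row[0] = 2; row[-1] = 2   (row[-1] = index len-1)
def gerar_vazio_py_alt (cols : Int) (linhas : Int) : List (List Int) :=
  if cols > 0 then
    (pvGridRows cols linhas).map (fun row => (row.set 0 2).set (row.length - 1) 2)
  else pvGridRows cols linhas

-- ===== PRECONDITION & SPEC =====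
def Spec_gerar_vazio_py (cols : Int) (linhas : Int) (out : List (List Int)) : Prop := out = gerar_vazio_py_alt cols linhas
instance (cols : Int) (linhas : Int) (out : List (List Int)) : Decidable (Spec_gerar_vazio_py cols linhas out) := by unfold Spec_gerar_vazio_py; infer_instance

-- ===== CLAIM (what is proved, stated in full; the proofs are below) =====
def Claim_equal_gerar_vazio_py : Prop := ∀ (cols : Int) (linhas : Int), Dom_gerar_vazio_py cols linhas → Spec_gerar_vazio_py cols linhas (gerar_vazio_py cols linhas)

-- ===== LEMMAS AND PROOFS =====
theorem pv_len_rows (cols linhas : Int) : (pvGridRows cols linhas).length = linhas.toNat := by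
  unfold pvGridRows; split <;> simp [pvGridFloor, PySem.List.length_pyRange_one]

-- after the row-overwrite phase, row r is all-2 on the border rows and all-1 otherwise
theorem pv_get_rows (cols linhas : Int) (r : Nat) (h : r < linhas.toNat) :
    (pvGridRows cols linhas)[r]'(by rw [pv_len_rows]; exact h) =
      List.replicate cols.toNat (if r = 0 ∨ r = linhas.toNat - 1 then (2 : Int) else 1) := by
  have hl : linhas > 0 := by omega
  unfold pvGridRows pvGridFloor
  simp only [if_pos hl]
  simp only [List.getElem_set, List.length_map, PySem.List.length_pyRange_one, List.getElem_map]
  split_ifs <;> first | rfl | omega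

theorem pv_main (cols linhas : Int) : gerar_vazio_py cols linhas = gerar_vazio_py_alt cols linhas := by
  unfold gerar_vazio_py gerar_vazio_py_alt
  apply List.ext_getElem
  · split <;> simp [pv_len_rows, PySem.List.length_pyRange_one]
  · intro r h1 h2
    have hr : r < linhas.toNat := by
      simpa [PySem.List.length_pyRange_one] using h1
    split
    case isTrue hc =>
      simp only [List.getElem_map, PySem.List.getElem_pyRange_one, pv_get_rows cols linhas r hr]
      apply List.ext_getElem
      · simp [PySem.List.length_pyRange_one]
      · intro c hc1 hc2
        simp only [List.getElem_map, PySem.List.getElem_pyRange_one, List.getElem_set,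
          List.length_replicate, List.getElem_replicate, zero_add]
        have hcm : c < cols.toNat := by
          simpa [PySem.List.length_pyRange_one] using hc1
        split_ifs <;> omega
    case isFalse hc =>
      simp only [List.getElem_map, pv_get_rows cols linhas r hr,
        PySem.List.pyRange_one_eq_nil (by omega : cols ≤ 0)]
      simp
      omega

-- ===== VERDICT (by name: the statement is the Claim_ definition above) =====
theorem gerar_vazio_py_spec : Claim_equal_gerar_vazio_py := by
  intro cols linhas _
  unfold Spec_gerar_vazio_py
  exact pv_main cols linhas
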